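-- pv_equiv track=rewrite | github.com/epilectrik/voynich | phases/AZC_TRAJECTORY_SHAPE/ats_05_elimination_order.py | compute_family_weighted_elimination
-- ===== SOURCE A (Python) =====
-- JUDGMENT_MATRIX = {
--     # Watch Closely (6)
--     'TEMPERATURE': {'C': 1, 'P': 1, 'R': 2, 'S': 0},
--     'PHASE_TRANSITION': {'C': 1, 'P': 2, 'R': 2, 'S': 0},
--     'QUALITY_PURITY': {'C': 1, 'P': 2, 'R': 1, 'S': 2},
--     'TIMING': {'C': 1, 'P': 2, 'R': 1, 'S': 2},
--     'MATERIAL_STATE': {'C': 2, 'P': 2, 'R': 1, 'S': 0},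
--     'STABILITY': {'C': 1, 'P': 2, 'R': 2, 'S': 0},
--
--     # Forbidden Intervention (3)
--     'EQUILIBRIUM_WAIT': {'C': 0, 'P': 0, 'R': 2, 'S': 2},
--     'CYCLE_COMPLETION': {'C': 0, 'P': 0, 'R': 2, 'S': 2},
--     'PURIFICATION_PATIENCE': {'C': 0, 'P': 0, 'R': 2, 'S': 2},
--
--     # Recovery Decision (4)
--     'ABORT_DECISION': {'C': 1, 'P': 2, 'R': 1, 'S': 0},
--     'CORRECTION_DECISION': {'C': 1, 'P': 2, 'R': 1, 'S': 0},
--     'CONTINUATION_DECISION': {'C': 1, 'P': 2, 'R': 1, 'S': 0},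
--     'COLLECTION_DECISION': {'C': 1, 'P': 2, 'R': 1, 'S': 0},
-- }
--
-- ZODIAC_TO_CANONICAL = {
--     'R1': 'R', 'R2': 'R', 'R3': 'R',
--     'S1': 'S', 'S2': 'S',
-- }
--
-- def compute_family_weighted_elimination(placement_vector, family):
--     """
--     Compute elimination order weighted by family's zone distribution.
--     Returns an elimination score for each judgment based on the family's
--     zone occupancy pattern.
--     """
--     elimination_scores = {}
--
--     for judgment, zone_values in JUDGMENT_MATRIX.items():
--         # Weighted score: higher = later elimination (more available)
--         score = 0
--         total_weight = 0
--
--         for zone, availability in zone_values.items():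
--             # Get placement weight for this zone
--             if family == 'zodiac':
--                 # Sum all subscripted positions that map to this zone
--                 weight = 0
--                 for sub_zone, canonical in ZODIAC_TO_CANONICAL.items():
--                     if canonical == zone:
--                         weight += placement_vector.get(sub_zone, 0)
--             else:
--                 weight = placement_vector.get(zone, 0)
--
--             # Weight the availability by zone presence
--             if availability > 0:  # PERMITTED or REQUIRED
--                 score += weight * availability
--             total_weight += weight
--
--         elimination_scores[judgment] = score
--
--     return elimination_scores
-- ===== SOURCE B (Python) =====
-- def compute_family_weighted_elimination(placement_vector, family):
--     """Closed-form elimination scores from the four canonical zone weights."""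
--     g = placement_vector.get
--     if family == 'zodiac':
--         c, p = 0, 0
--         r = g('R1', 0) + g('R2', 0) + g('R3', 0)
--         s = g('S1', 0) + g('S2', 0)
--     else:
--         c, p, r, s = g('C', 0), g('P', 0), g('R', 0), g('S', 0)
--     watch = c + 2 * p + 2 * r          # C1 P2 R2 S0 rows
--     forbidden = 2 * r + 2 * s          # C0 P0 R2 S2 rows
--     decision = c + 2 * p + r           # C1 P2 R1 S0 rows
--     return {
--         'TEMPERATURE': c + p + 2 * r,
--         'PHASE_TRANSITION': watch,
--         'QUALITY_PURITY': decision + 2 * s,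
--         'TIMING': decision + 2 * s,
--         'MATERIAL_STATE': 2 * c + 2 * p + r,
--         'STABILITY': watch,
--         'EQUILIBRIUM_WAIT': forbidden,
--         'CYCLE_COMPLETION': forbidden,
--         'PURIFICATION_PATIENCE': forbidden,
--         'ABORT_DECISION': decision,
--         'CORRECTION_DECISION': decision,
--         'CONTINUATION_DECISION': decision,
--         'COLLECTION_DECISION': decision,
--     }
-- ===== Notes on version B (the rewrite author's own statement) =====
-- stated objective: simpler
-- what changed: Replaces both nested loops and the ZODIAC_TO_CANONICAL rescans with a closed form: the four canonical zone weights are computed once and each judgment's score is a fixed linear expression in them (identical matrix rows share one expression), so B contains no loop over the judgment matrix at all.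
import Mathlib
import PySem

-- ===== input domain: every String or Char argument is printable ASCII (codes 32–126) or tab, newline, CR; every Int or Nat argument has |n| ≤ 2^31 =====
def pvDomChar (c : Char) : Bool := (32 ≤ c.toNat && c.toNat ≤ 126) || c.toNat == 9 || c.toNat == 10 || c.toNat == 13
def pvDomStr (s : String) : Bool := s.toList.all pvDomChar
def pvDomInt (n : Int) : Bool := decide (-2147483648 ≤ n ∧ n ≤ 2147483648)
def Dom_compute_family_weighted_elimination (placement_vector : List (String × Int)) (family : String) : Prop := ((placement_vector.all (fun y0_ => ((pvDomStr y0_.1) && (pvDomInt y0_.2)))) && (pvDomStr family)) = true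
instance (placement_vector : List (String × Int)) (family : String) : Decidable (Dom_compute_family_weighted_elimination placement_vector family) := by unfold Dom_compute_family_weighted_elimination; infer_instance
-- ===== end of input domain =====

-- B replaces A's nested loops over the judgment matrix (with inner zodiac rescans)
-- by a closed form: four zone weights computed once, one fixed linear expression
-- per distinct matrix row (objective: simpler).

-- ===== PORT A =====
def pvJM : List (String × List (String × Int)) :=
  [("TEMPERATURE", [("C",1),("P",1),("R",2),("S",0)]),
   ("PHASE_TRANSITION", [("C",1),("P",2),("R",2),("S",0)]),
   ("QUALITY_PURITY", [("C",1),("P",2),("R",1),("S",2)]),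
   ("TIMING", [("C",1),("P",2),("R",1),("S",2)]),
   ("MATERIAL_STATE", [("C",2),("P",2),("R",1),("S",0)]),
   ("STABILITY", [("C",1),("P",2),("R",2),("S",0)]),
   ("EQUILIBRIUM_WAIT", [("C",0),("P",0),("R",2),("S",2)]),
   ("CYCLE_COMPLETION", [("C",0),("P",0),("R",2),("S",2)]),
   ("PURIFICATION_PATIENCE", [("C",0),("P",0),("R",2),("S",2)]),
   ("ABORT_DECISION", [("C",1),("P",2),("R",1),("S",0)]),
   ("CORRECTION_DECISION", [("C",1),("P",2),("R",1),("S",0)]),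
   ("CONTINUATION_DECISION", [("C",1),("P",2),("R",1),("S",0)]),
   ("COLLECTION_DECISION", [("C",1),("P",2),("R",1),("S",0)])]

def pvZTC : List (String × String) :=
  [("R1","R"),("R2","R"),("R3","R"),("S1","S"),("S2","S")]

-- literal transliteration of A: nested loops, inner zodiac rescan, (score, total_weight) state
def compute_family_weighted_elimination (placement_vector : List (String × Int)) (family : String) : List (String × Int) :=
  (pvJM.foldl (fun (scores : PySem.Dict String Int) jz =>
      let st := jz.2.foldl (fun (st : Int × Int) za =>
          let weight : Int :=
            if family == "zodiac" then
              pvZTC.foldl (fun w sc =>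
                if sc.2 == za.1 then w + (PySem.Dict.mk placement_vector).getD sc.1 0 else w) 0
            else (PySem.Dict.mk placement_vector).getD za.1 0
          let score := if za.2 > 0 then st.1 + weight * za.2 else st.1
          (score, st.2 + weight)) (0, 0)
      scores.insert jz.1 st.1) PySem.Dict.empty).items

-- ===== PORT B =====
-- transliteration of Source B: four weights, three shared row expressions, literal result
def compute_family_weighted_elimination_alt (placement_vector : List (String × Int)) (family : String) : List (String × Int) :=
  let g := fun (k : String) => (PySem.Dict.mk placement_vector).getD k 0
  let cprs : Int × Int × Int × Int :=
    if family == "zodiac" then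
      (0, 0, g "R1" + g "R2" + g "R3", g "S1" + g "S2")
    else (g "C", g "P", g "R", g "S")
  let c := cprs.1; let p := cprs.2.1; let r := cprs.2.2.1; let s := cprs.2.2.2
  let watch := c + 2 * p + 2 * r
  let forbidden := 2 * r + 2 * s
  let decision := c + 2 * p + r
  [("TEMPERATURE", c + p + 2 * r),
   ("PHASE_TRANSITION", watch),
   ("QUALITY_PURITY", decision + 2 * s),
   ("TIMING", decision + 2 * s),
   ("MATERIAL_STATE", 2 * c + 2 * p + r),
   ("STABILITY", watch),
   ("EQUILIBRIUM_WAIT", forbidden),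
   ("CYCLE_COMPLETION", forbidden),
   ("PURIFICATION_PATIENCE", forbidden),
   ("ABORT_DECISION", decision),
   ("CORRECTION_DECISION", decision),
   ("CONTINUATION_DECISION", decision),
   ("COLLECTION_DECISION", decision)]

-- ===== PRECONDITION & SPEC =====
def Spec_compute_family_weighted_elimination (placement_vector : List (String × Int)) (family : String) (out : List (String × Int)) : Prop := out = compute_family_weighted_elimination_alt placement_vector family
instance (placement_vector : List (String × Int)) (family : String) (out : List (String × Int)) : Decidable (Spec_compute_family_weighted_elimination placement_vector family out) := by unfold Spec_compute_family_weighted_elimination; infer_instance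

-- ===== CLAIM (what is proved, stated in full; the proofs are below) =====
def Claim_equal_compute_family_weighted_elimination : Prop := ∀ (placement_vector : List (String × Int)) (family : String), Dom_compute_family_weighted_elimination placement_vector family → Spec_compute_family_weighted_elimination placement_vector family (compute_family_weighted_elimination placement_vector family)

-- ===== LEMMAS AND PROOFS =====

set_option maxHeartbeats 2000000 in
theorem cfwe_eq (placement_vector : List (String × Int)) (family : String) :
    compute_family_weighted_elimination placement_vector family
      = compute_family_weighted_elimination_alt placement_vector family := by
  by_cases h : family == "zodiac" <;>
    simp [compute_family_weighted_elimination, compute_family_weighted_elimination_alt,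
      pvJM, pvZTC, h, PySem.Dict.insert, PySem.Dict.getD,
      PySem.Dict.get?, PySem.Dict.empty, PySem.Dict.contains] <;> and_intros <;> ring

-- ===== VERDICT (by name: the statement is the Claim_ definition above) =====
theorem compute_family_weighted_elimination_spec : Claim_equal_compute_family_weighted_elimination := by
  intro pv fam _
  unfold Spec_compute_family_weighted_elimination
  exact cfwe_eq pv fam
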